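-- pv_equiv track=rewrite | github.com/3D-FRONT-FUTURE/3D-FRONT-ToolBox | Room/Preprocess/src/tools.py | slice_array
-- ===== SOURCE A (Python) =====
-- def slice_array(array_data):
--     """sclice array based on continue same element
--
--     Arguments:
--         array_data {[a, b, c, ... ]} -- a list of number
--
--     Returns:
--         [a, b, c] -- a list of sliced number
--     """
--     slice_index = []
--     tmp_data_list = []
--     for i, data in enumerate(array_data):
--         if i == 0:
--             tmp_data_list.append(data)
--             continue
--         if data not in tmp_data_list:
--             slice_index.append(i)
--             tmp_data_list = []
--             tmp_data_list.append(data)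
--
--     return slice_index
-- ===== SOURCE B (Python) =====
-- def slice_array(array_data):
--     # Build maximal runs of equal values first, then prefix-sum the run
--     # lengths; the boundaries are all cumulative totals except the last.
--     runs = []
--     for x in array_data:
--         if runs and runs[-1][0] == x:
--             runs[-1][1] += 1
--         else:
--             runs.append([x, 1])
--     result = []
--     total = 0
--     for _, length in runs:
--         total += length
--         result.append(total)
--     return result[:-1]
-- ===== Notes on version B (the rewrite author's own statement) =====
-- stated objective: alternative
-- what changed: B groups the list into maximal runs of equal values and prefix-sums the run lengths (dropping the final total) instead of A's element-by-element comparison against the last boundary value with an index accumulator.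
import Mathlib
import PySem

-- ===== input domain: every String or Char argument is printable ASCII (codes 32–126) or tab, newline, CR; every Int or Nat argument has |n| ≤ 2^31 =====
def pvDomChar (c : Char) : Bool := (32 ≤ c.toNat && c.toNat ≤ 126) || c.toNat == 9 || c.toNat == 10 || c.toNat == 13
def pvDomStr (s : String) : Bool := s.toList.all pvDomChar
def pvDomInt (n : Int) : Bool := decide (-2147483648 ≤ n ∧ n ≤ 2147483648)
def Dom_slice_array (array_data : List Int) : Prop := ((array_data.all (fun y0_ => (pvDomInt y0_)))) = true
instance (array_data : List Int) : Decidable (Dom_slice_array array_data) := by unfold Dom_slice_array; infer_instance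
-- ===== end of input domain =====

-- B builds maximal runs of equal values and prefix-sums the run lengths (dropping the
-- final total) instead of A's element-by-element comparison against the last boundary
-- value; an alternative decomposition of the same linear pass.


-- ===== PORT A =====
-- loop body: i == 0 seeds tmp_data_list; otherwise a data not in tmp_data_list
-- records the index and resets tmp_data_list to [data].
def sliceAStep (st : List Int × List Int) (p : Int × Int) : List Int × List Int :=
  if p.1 == 0 then (st.1, st.2 ++ [p.2])
  else if ¬ st.2.contains p.2 then (st.1 ++ [p.1], [p.2])
  else st

def slice_array (array_data : List Int) : List Int :=
  ((PySem.List.enumerate array_data 0).foldl sliceAStep ([], [])).1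

-- ===== PORT B =====
-- first loop of Source B: extend the last run in place ('runs and runs[-1][0] == x')
-- or append a fresh run.
def runsStep (runs : List (Int × Int)) (x : Int) : List (Int × Int) :=
  match runs.getLast? with
  | some (v, n) => if v == x then runs.dropLast ++ [(v, n + 1)] else runs ++ [(x, 1)]
  | none => runs ++ [(x, 1)]

-- second loop of Source B: accumulate the cumulative total and append it to result.
def sumsStep (st : Int × List Int) (r : Int × Int) : Int × List Int :=
  (st.1 + r.2, st.2 ++ [st.1 + r.2])

def slice_array_alt (array_data : List Int) : List Int :=
  PySem.List.slice (((array_data.foldl runsStep []).foldl sumsStep (0, [])).2) none (some (-1))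

-- ===== PRECONDITION & SPEC =====
def Spec_slice_array (array_data : List Int) (out : List Int) : Prop := out = slice_array_alt array_data
instance (array_data : List Int) (out : List Int) : Decidable (Spec_slice_array array_data out) := by unfold Spec_slice_array; infer_instance

-- ===== CLAIM (what is proved, stated in full; the proofs are below) =====
def Claim_equal_slice_array : Prop := ∀ (array_data : List Int), Dom_slice_array array_data → Spec_slice_array array_data (slice_array array_data)

-- ===== LEMMAS AND PROOFS =====

-- boundary indices of l, given the current run value v and the index i of l's head
def pvBnds (v i : Int) : List Int → List Int
  | [] => []
  | x :: xs => if x = v then pvBnds v (i + 1) xs else i :: pvBnds x (i + 1) xs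

-- runs of l, given an open run (v, n)
def pvRuns (v n : Int) : List Int → List (Int × Int)
  | [] => [(v, n)]
  | x :: xs => if x = v then pvRuns v (n + 1) xs else (v, n) :: pvRuns x 1 xs

-- cumulative totals of run lengths starting from t
def pvSums (t : Int) : List (Int × Int) → List Int
  | [] => []
  | r :: rs => (t + r.2) :: pvSums (t + r.2) rs

theorem pvRuns_ne_nil (l : List Int) : ∀ (v n : Int), pvRuns v n l ≠ [] := by
  induction l with
  | nil => intro v n; simp [pvRuns]
  | cons x xs ih =>
    intro v n
    unfold pvRuns
    split
    · exact ih v (n + 1)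
    · simp

theorem pvSums_ne_nil (t : Int) (rs : List (Int × Int)) (h : rs ≠ []) : pvSums t rs ≠ [] := by
  cases rs with
  | nil => exact absurd rfl h
  | cons r rs => simp [pvSums]

-- A's loop over the tail: tmp_data_list = [v], all indices ≥ 1
theorem sliceA_fold (l : List Int) : ∀ (i : Int), 1 ≤ i → ∀ (si : List Int) (v : Int),
    (PySem.List.enumerate l i).foldl sliceAStep (si, [v])
      = (si ++ pvBnds v i l, [l.getLastD v]) := by
  induction l with
  | nil => intro i hi si v; simp [PySem.List.enumerate_nil, pvBnds]
  | cons x xs ih =>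
    intro i hi si v
    rw [PySem.List.enumerate_cons, List.foldl_cons]
    have hi0 : (i == 0) = false := by simp only [beq_eq_false_iff_ne]; omega
    by_cases hxv : x = v
    · subst hxv
      have hstep : sliceAStep (si, [x]) (i, x) = (si, [x]) := by
        simp [sliceAStep, hi0]
      rw [hstep, ih (i + 1) (by omega) si x]
      simp [pvBnds]
      cases xs <;> simp
    · have hstep : sliceAStep (si, [v]) (i, x) = (si ++ [i], [x]) := by
        simp [sliceAStep, hi0, hxv]
      rw [hstep, ih (i + 1) (by omega) (si ++ [i]) x]
      simp [pvBnds, hxv]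
      cases xs <;> simp [← List.getLastD_eq_getLast?, List.getLastD_cons]

-- B's first loop equals pvRuns
theorem runs_fold (l : List Int) : ∀ (rs : List (Int × Int)) (v n : Int),
    l.foldl runsStep (rs ++ [(v, n)]) = rs ++ pvRuns v n l := by
  induction l with
  | nil => intro rs v n; simp [pvRuns]
  | cons x xs ih =>
    intro rs v n
    rw [List.foldl_cons]
    have hl : (rs ++ [(v, n)]).getLast? = some (v, n) := by simp
    by_cases hvx : v = x
    · subst hvx
      have hstep : runsStep (rs ++ [(v, n)]) v = rs ++ [(v, n + 1)] := by
        simp [runsStep, hl]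
      rw [hstep, ih rs v (n + 1)]
      simp [pvRuns]
    · have hstep : runsStep (rs ++ [(v, n)]) x = (rs ++ [(v, n)]) ++ [(x, 1)] := by
        simp [runsStep, hl, hvx]
      rw [hstep, ih (rs ++ [(v, n)]) x 1]
      have hxv : ¬ x = v := fun h => hvx h.symm
      simp [pvRuns, hxv]
  
-- B's second loop equals pvSums
theorem sums_fold (rs : List (Int × Int)) : ∀ (t : Int) (res : List Int),
    (rs.foldl sumsStep (t, res)).2 = res ++ pvSums t rs := by
  induction rs with
  | nil => intro t res; simp [pvSums]
  | cons r rs ih =>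
    intro t res
    rw [List.foldl_cons, show sumsStep (t, res) r = (t + r.2, res ++ [t + r.2]) from rfl,
      ih (t + r.2) (res ++ [t + r.2])]
    simp [pvSums]

-- dropping the last cumulative total gives exactly the boundary indices
theorem sums_runs (l : List Int) : ∀ (v n t : Int),
    (pvSums t (pvRuns v n l)).dropLast = pvBnds v (t + n) l := by
  induction l with
  | nil => intro v n t; simp [pvRuns, pvSums, pvBnds]
  | cons x xs ih =>
    intro v n t
    by_cases hxv : x = v
    · subst hxv
      rw [show pvRuns x n (x :: xs) = pvRuns x (n + 1) xs from by simp [pvRuns]]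
      rw [ih x (n + 1) t]
      rw [show pvBnds x (t + n) (x :: xs) = pvBnds x (t + n + 1) xs from by simp [pvBnds]]
      rw [show t + (n + 1) = t + n + 1 by ring]
    · rw [show pvRuns v n (x :: xs) = (v, n) :: pvRuns x 1 xs from by simp [pvRuns, hxv]]
      rw [show pvSums t ((v, n) :: pvRuns x 1 xs)
            = (t + n) :: pvSums (t + n) (pvRuns x 1 xs) from rfl]
      rw [List.dropLast_cons_of_ne_nil (pvSums_ne_nil _ _ (pvRuns_ne_nil xs x 1))]
      rw [ih x 1 (t + n)]
      simp [pvBnds, hxv]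

theorem sliceA_eq (l : List Int) :
    slice_array l = match l with
      | [] => []
      | x :: xs => pvBnds x 1 xs := by
  cases l with
  | nil => simp [slice_array, PySem.List.enumerate_nil]
  | cons x xs =>
    unfold slice_array
    rw [PySem.List.enumerate_cons, List.foldl_cons]
    rw [show sliceAStep (([] : List Int), ([] : List Int)) ((0 : Int), x) = ([], [x]) from by
      simp [sliceAStep]]
    rw [show (0 : Int) + 1 = 1 from rfl, sliceA_fold xs 1 (by norm_num) [] x]
    simp

theorem sliceB_eq (l : List Int) :
    slice_array_alt l = match l with
      | [] => []
      | x :: xs => pvBnds x 1 xs := by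
  cases l with
  | nil => simp [slice_array_alt, PySem.List.slice]
  | cons x xs =>
    unfold slice_array_alt
    rw [List.foldl_cons, show runsStep [] x = [] ++ [(x, 1)] from rfl,
      runs_fold xs [] x 1, List.nil_append, PySem.List.slice_to_neg_one,
      sums_fold (pvRuns x 1 xs) 0 [], List.nil_append]
    have := sums_runs xs x 1 0
    simpa using this

-- ===== VERDICT (by name: the statement is the Claim_ definition above) =====
theorem slice_array_spec : Claim_equal_slice_array := by
  intro l _
  unfold Spec_slice_array
  rw [sliceA_eq, sliceB_eq]
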